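-- pv_equiv track=rewrite | github.com/MaggiCoder16/Codunot---a-discord-bot | mod_commands.py | _tokenize_nlp
-- ===== SOURCE A (Python) =====
-- def _tokenize_nlp(text: str) -> list[str]:
--     tokens = [t for t in text.split(" ") if t]
--     normalized: list[str] = []
--     for t in tokens:
--         if len(t) > 5 and t.endswith("ing") and len(t[:-3]) >= 4:
--             t = t[:-3]
--         elif len(t) > 4 and t.endswith("ed") and len(t[:-2]) >= 4:
--             t = t[:-2]
--         elif len(t) > 4 and t.endswith("es") and len(t[:-2]) >= 4:
--             t = t[:-2]
--         elif len(t) > 3 and t.endswith("s") and len(t[:-1]) >= 4: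
--             t = t[:-1]
--         normalized.append(t)
--     return normalized
-- ===== SOURCE B (Python) =====
-- # Reverse-suffix automaton: walk the token's characters from the end through a
-- # flat transition table, keeping the deepest matching rule whose length
-- # threshold is met ("longest valid suffix" semantics).
-- _TRANS = {(0, "g"): 1, (1, "n"): 2, (2, "i"): 3,
--           (0, "d"): 4, (4, "e"): 5,
--           (0, "s"): 6, (6, "e"): 7}
-- _OUT = {3: (3, 7), 5: (2, 6), 6: (1, 5), 7: (2, 6)}
--
--
-- def _stem(t: str) -> str:
--     n = len(t)
--     state = 0
--     cut = 0
--     for ch in reversed(t):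
--         nxt = _TRANS.get((state, ch))
--         if nxt is None:
--             break
--         state = nxt
--         rule = _OUT.get(state)
--         if rule is not None and n >= rule[1]:
--             cut = rule[0]
--     return t[:n - cut]
--
--
-- def _tokenize_nlp(text: str) -> list[str]:
--     return [_stem(t) for t in text.split(" ") if t]
-- ===== Notes on version B (the rewrite author's own statement) =====
-- stated objective: alternative
-- what changed: Replaces the four-branch if/elif suffix cascade (repeated endswith tests on the whole token) by a single walk of the token's characters from the end through a flat suffix automaton (transition table + output table), keeping the deepest rule whose length threshold is met.
import Mathlib
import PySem

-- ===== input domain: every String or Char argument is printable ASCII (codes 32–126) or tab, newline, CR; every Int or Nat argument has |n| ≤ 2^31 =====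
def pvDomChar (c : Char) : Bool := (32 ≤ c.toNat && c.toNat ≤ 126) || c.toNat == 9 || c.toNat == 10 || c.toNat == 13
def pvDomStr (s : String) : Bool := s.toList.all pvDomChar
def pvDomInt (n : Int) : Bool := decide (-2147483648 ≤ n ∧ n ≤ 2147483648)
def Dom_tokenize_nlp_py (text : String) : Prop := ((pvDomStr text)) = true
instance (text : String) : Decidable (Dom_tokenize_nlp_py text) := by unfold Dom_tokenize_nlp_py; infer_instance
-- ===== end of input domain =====

-- B replaces A's per-token if/elif suffix cascade by a single reverse walk of the
-- token through a flat suffix automaton (transition/output tables), keeping the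
-- deepest rule whose length threshold holds (objective: alternative).

-- ===== PORT A =====
-- A's per-token if/elif cascade, on the token's code points.
def pvStemA (t : List Char) : List Char :=
  if t.length > 5 ∧ PySem.Chars.endswith t ['i','n','g'] = true ∧
      (PySem.Chars.slice t none (some (-3))).length ≥ 4 then
    PySem.Chars.slice t none (some (-3))
  else if t.length > 4 ∧ PySem.Chars.endswith t ['e','d'] = true ∧
      (PySem.Chars.slice t none (some (-2))).length ≥ 4 then
    PySem.Chars.slice t none (some (-2))
  else if t.length > 4 ∧ PySem.Chars.endswith t ['e','s'] = true ∧
      (PySem.Chars.slice t none (some (-2))).length ≥ 4 then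
    PySem.Chars.slice t none (some (-2))
  else if t.length > 3 ∧ PySem.Chars.endswith t ['s'] = true ∧
      (PySem.Chars.slice t none (some (-1))).length ≥ 4 then
    PySem.Chars.slice t none (some (-1))
  else t

def tokenize_nlp_py (text : String) : List String :=
  let tokens := (PySem.Chars.splitOn text.toList [' ']).filter (fun t => t ≠ [])
  tokens.foldl (fun acc t => acc ++ [String.ofList (pvStemA t)]) []

-- ===== PORT B =====
-- B's flat automaton tables (_TRANS and _OUT in Source B): states 0..7,
-- transitions keyed by (state, next char of the reversed token).
def pvTRANS : List ((Nat × Char) × Nat) :=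
  [((0,'g'),1), ((1,'n'),2), ((2,'i'),3), ((0,'d'),4), ((4,'e'),5), ((0,'s'),6), ((6,'e'),7)]
def pvOUT : List (Nat × (Nat × Nat)) :=
  [(3,(3,7)), (5,(2,6)), (6,(1,5)), (7,(2,6))]

-- dict.get on Source B's literal dicts (keys distinct, so first-match lookup is exact)
def pvGet {K V : Type} [BEq K] (d : List (K × V)) (k : K) : Option V :=
  (d.find? (fun p => p.1 == k)).map (·.2)

-- the for-loop of Source B's _stem: walk the reversed token, update (state, cut), break on a missing transition
def pvStemRun : List Char → Nat → Nat → Nat → Nat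
  | [], _, _, cut => cut
  | ch :: rest, state, n, cut =>
    match pvGet pvTRANS (state, ch) with
    | none => cut
    | some s' =>
      match pvGet pvOUT s' with
      | some rule => pvStemRun rest s' n (if n ≥ rule.2 then rule.1 else cut)
      | none => pvStemRun rest s' n cut

def pvStemB (t : List Char) : List Char :=
  t.take (t.length - pvStemRun t.reverse 0 t.length 0)

def tokenize_nlp_py_alt (text : String) : List String :=
  ((PySem.Chars.splitOn text.toList [' ']).filter (fun t => t ≠ [])).map
    (fun t => String.ofList (pvStemB t))

-- ===== PRECONDITION & SPEC =====
def Spec_tokenize_nlp_py (text : String) (out : List String) : Prop := out = tokenize_nlp_py_alt text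
instance (text : String) (out : List String) : Decidable (Spec_tokenize_nlp_py text out) := by unfold Spec_tokenize_nlp_py; infer_instance

-- ===== CLAIM (what is proved, stated in full; the proofs are below) =====
def Claim_equal_tokenize_nlp_py : Prop := ∀ (text : String), Dom_tokenize_nlp_py text → Spec_tokenize_nlp_py text (tokenize_nlp_py text)

-- ===== LEMMAS AND PROOFS =====

-- the common characterisation: how many characters get stripped, as a function of
-- the reversed token r and its length n
def pvCut (r : List Char) (n : Nat) : Nat :=
  if 7 ≤ n ∧ ['g','n','i'] <+: r then 3
  else if 6 ≤ n ∧ ['d','e'] <+: r then 2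
  else if 6 ≤ n ∧ ['s','e'] <+: r then 2
  else if 5 ≤ n ∧ ['s'] <+: r then 1 else 0

-- states 3, 5 and 7 have no outgoing transitions: the automaton stops there
lemma pvStemRun_dead (rest : List Char) (s n cut : Nat) (hs : s = 3 ∨ s = 5 ∨ s = 7) :
    pvStemRun rest s n cut = cut := by
  rcases hs with h | h | h <;> subst h <;>
    (cases rest with
     | nil => rfl
     | cons ch r => simp [pvStemRun, pvTRANS, pvGet])

-- the automaton walk computes pvCut
lemma pvStemRun_eq_cut (r : List Char) (n : Nat) : pvStemRun r 0 n 0 = pvCut r n := by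
  unfold pvCut
  match r with
  | [] => simp [pvStemRun]
  | a :: r1 =>
    by_cases hg : a = 'g'
    · subst hg
      match r1 with
      | [] => simp [pvStemRun, pvTRANS, pvOUT, pvGet, List.cons_prefix_cons]
      | b :: r2 =>
        by_cases hn : b = 'n'
        · subst hn
          match r2 with
          | [] => simp [pvStemRun, pvTRANS, pvOUT, pvGet, List.cons_prefix_cons]
          | c :: r3 =>
            by_cases hi : c = 'i'
            · subst hi
              simp only [pvStemRun, pvTRANS, pvOUT, pvGet, List.find?, beq_eq_decide]
              simp [pvStemRun_dead r3 3 n _ (Or.inl rfl), List.cons_prefix_cons]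
            · simp [pvStemRun, pvTRANS, pvOUT, pvGet, beq_eq_decide, Ne.symm hi,
                    List.cons_prefix_cons]
        · simp [pvStemRun, pvTRANS, pvOUT, pvGet, beq_eq_decide, Ne.symm hn,
                List.cons_prefix_cons]
    · by_cases hd : a = 'd'
      · subst hd
        match r1 with
        | [] => simp [pvStemRun, pvTRANS, pvOUT, pvGet, List.cons_prefix_cons]
        | b :: r2 =>
          by_cases he : b = 'e'
          · subst he
            simp only [pvStemRun, pvTRANS, pvOUT, pvGet, List.find?, beq_eq_decide]
            simp [pvStemRun_dead r2 5 n _ (Or.inr (Or.inl rfl)), List.cons_prefix_cons]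
          · simp [pvStemRun, pvTRANS, pvOUT, pvGet, beq_eq_decide, Ne.symm he,
                  List.cons_prefix_cons]
      · by_cases hs : a = 's'
        · subst hs
          match r1 with
          | [] =>
            simp [pvStemRun, pvTRANS, pvOUT, pvGet, List.cons_prefix_cons]
          | b :: r2 =>
            by_cases he : b = 'e'
            · subst he
              simp only [pvStemRun, pvTRANS, pvOUT, pvGet, List.find?, beq_eq_decide]
              simp [pvStemRun_dead r2 7 n _ (Or.inr (Or.inr rfl)), List.cons_prefix_cons]
            · simp [pvStemRun, pvTRANS, pvOUT, pvGet, beq_eq_decide, Ne.symm he,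
                    List.cons_prefix_cons]
        · simp [pvStemRun, pvTRANS, pvGet, beq_eq_decide, Ne.symm hg, Ne.symm hd,
                Ne.symm hs, List.cons_prefix_cons]

-- endswith on a reversed list is a prefix test on the list
lemma pvEnds_rev (r s : List Char) :
    PySem.Chars.endswith r.reverse s = decide (s.reverse <+: r) := by
  have key : PySem.Chars.endswith r.reverse s = true ↔ s.reverse <+: r := by
    rw [PySem.Chars.endswith_iff, ← List.reverse_suffix, List.reverse_reverse]
  by_cases hp : s.reverse <+: r
  · simp only [hp, decide_true]; exact key.mpr hp
  · simp only [hp, decide_false]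
    exact Bool.eq_false_iff.mpr (fun hc => hp (key.mp hc))

-- A's cascade also computes pvCut (stated on the reversed token)
lemma pvStemA_rev (r : List Char) :
    pvStemA r.reverse = (r.reverse).take (r.length - pvCut r r.length) := by
  have e3 : PySem.Chars.slice r.reverse none (some (-3)) = (r.reverse).take (r.length - 3) := by
    rw [PySem.Chars.slice_eq_listSlice]
    have := PySem.List.slice_to_neg_ofNat r.reverse 3 (by omega)
    simpa using this
  have e2 : PySem.Chars.slice r.reverse none (some (-2)) = (r.reverse).take (r.length - 2) := by
    rw [PySem.Chars.slice_eq_listSlice]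
    have := PySem.List.slice_to_neg_ofNat r.reverse 2 (by omega)
    simpa using this
  have e1 : PySem.Chars.slice r.reverse none (some (-1)) = (r.reverse).take (r.length - 1) := by
    rw [PySem.Chars.slice_eq_listSlice, PySem.List.slice_to_neg_one, List.dropLast_eq_take]
    simp
  unfold pvStemA pvCut
  rw [e3, e2, e1, pvEnds_rev, pvEnds_rev, pvEnds_rev, pvEnds_rev]
  simp only [List.length_reverse, List.length_take, decide_eq_true_eq]
  have c1 : (r.reverse.length > 5 ∧ ['g','n','i'] <+: r ∧ min (r.length - 3) r.reverse.length ≥ 4)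
      ↔ (7 ≤ r.length ∧ ['g','n','i'] <+: r) := by
    simp only [List.length_reverse]; constructor
    · rintro ⟨a, b, c⟩; exact ⟨by omega, b⟩
    · rintro ⟨a, b⟩; exact ⟨by omega, b, by omega⟩
  have c2 : (r.reverse.length > 4 ∧ ['d','e'] <+: r ∧ min (r.length - 2) r.reverse.length ≥ 4)
      ↔ (6 ≤ r.length ∧ ['d','e'] <+: r) := by
    simp only [List.length_reverse]; constructor
    · rintro ⟨a, b, c⟩; exact ⟨by omega, b⟩
    · rintro ⟨a, b⟩; exact ⟨by omega, b, by omega⟩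
  have c3 : (r.reverse.length > 4 ∧ ['s','e'] <+: r ∧ min (r.length - 2) r.reverse.length ≥ 4)
      ↔ (6 ≤ r.length ∧ ['s','e'] <+: r) := by
    simp only [List.length_reverse]; constructor
    · rintro ⟨a, b, c⟩; exact ⟨by omega, b⟩
    · rintro ⟨a, b⟩; exact ⟨by omega, b, by omega⟩
  have c4 : (r.reverse.length > 3 ∧ ['s'] <+: r ∧ min (r.length - 1) r.reverse.length ≥ 4)
      ↔ (5 ≤ r.length ∧ ['s'] <+: r) := by
    simp only [List.length_reverse]; constructor
    · rintro ⟨a, b, c⟩; exact ⟨by omega, b⟩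
    · rintro ⟨a, b⟩; exact ⟨by omega, b, by omega⟩
  simp only [List.length_reverse] at c1 c2 c3 c4
  simp only [show (['i','n','g'] : List Char).reverse = ['g','n','i'] from rfl,
    show (['e','d'] : List Char).reverse = ['d','e'] from rfl,
    show (['e','s'] : List Char).reverse = ['s','e'] from rfl,
    show (['s'] : List Char).reverse = ['s'] from rfl]
  simp only [c1, c2, c3, c4]
  split_ifs <;> simp [List.take_of_length_le]

lemma pvStem_eq (t : List Char) : pvStemA t = pvStemB t := by
  have h := pvStemA_rev t.reverse
  rw [List.reverse_reverse] at h
  rw [h]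
  unfold pvStemB
  rw [pvStemRun_eq_cut, List.length_reverse]

-- ===== VERDICT (by name: the statement is the Claim_ definition above) =====
theorem tokenize_nlp_py_spec : Claim_equal_tokenize_nlp_py := by
  intro text _
  unfold Spec_tokenize_nlp_py tokenize_nlp_py tokenize_nlp_py_alt
  rw [PySem.List.foldl_append_singleton_eq_map]
  simp [pvStem_eq]
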